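-- pv_equiv track=rewrite | github.com/collinleiber/LMU_Master_Practical_SoSe24 | practical/ProcessMining/group1/task3/inductiveminer.py | _loop_cut
-- ===== SOURCE A (Python) =====
-- from typing import List, Tuple, Dict, Set, Optional
--
-- def _loop_cut(dfg: Dict[Tuple[str, str], int], start: Dict[str, int], end: Dict[str, int]) -> List[Set[str]]:
--     """
--     Applies the loop cut to the directly-follows graph (dfg).
--
--     Parameters:
--         dfg: Directly-follows graph
--         start: Start activities in the log
--         end: End activities in the log
--
--     Returns:
--         List of groups of activities that form the loop cut.
--     """
--     # Extract edges from the dfg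
--     edges = dfg.keys()
--     start_activities = set(start.keys())
--     end_activities = set(end.keys())
--
--     # Merge start and end activities into the first group (do-group)
--     groups = [start_activities.union(end_activities)]
--
--     # Extract inner edges (excluding start and end activities)
--     inner_edges = [edge for edge in edges if edge[0] not in groups[0] and edge[1] not in groups[0]]
--
--     # Create a group for the inner edges (loop group)
--     groups.append(set([activity for edge in inner_edges for activity in edge]))
--
--     # Exclude sets that are non-reachable from start/end activities from the loop groups
--     def exclude_non_reachable(groups):
--         group_a, group_b = set(), set()
--         for group in groups:
--             group_a = group if a in group else group_a
--             group_b = group if b in group else group_b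
--         groups = [group for group in groups if group != group_a and group != group_b]
--         groups.insert(0, group_a.union(group_b))
--
--     pure_start_activities = start_activities.difference(end_activities)  # only start, not end activity
--     # Put all activities in the do-group that follow a start activity which is not an end activity
--     # (a loop activity can only follow a start activity if it is also an end activity)
--     for a in pure_start_activities:
--         for (x, b) in edges:
--             if x == a:
--                 exclude_non_reachable(groups)
--
--     pure_end_activities = end_activities.difference(start_activities)  # only end, not start activity
--     # Put all activities in the do-group that precede an end activity which is not a start activity
--     # (a loop activity can only precede an end activity if it is also a start activity)
--     for b in pure_end_activities:
--         for (a, x) in edges: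
--             if x == b:
--                 exclude_non_reachable(groups)
--     # Check start completeness
--     # All loop activities must be able to reach the start activities
--     i = 1
--     while i < len(groups):
--         merge = False
--         for a in groups[i]:
--             for (x, b) in edges:
--                 if x == a and b in start_activities:
--                     if not any((a, s) in edges for s in start_activities):  # no direct edge from activity to start
--                         merge = True  # merge with the do-group as it cannot be in the loop-group
--         if merge:
--             groups[0] = groups[0].union(groups[i])
--             groups.pop(i)
--         else:
--             i += 1
--
--     # Check end completeness
--     # All loop activities must be able to be reached from the end activities
--     i = 1
--     while i < len(groups):
--         merge = False
--         for a in groups[i]: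
--             for (b, x) in edges:
--                 if x == a and b in end_activities:
--                     if not any((e, a) in edges for e in end_activities):  # no direct edge from end to activity
--                         merge = True  # merge with the do-group as it cannot be in the loop-group
--         if merge:
--             groups[0] = groups[0].union(groups[i])
--             groups.pop(i)
--         else:
--             i += 1
--
--     # Return the cut if more than one group (i.e., do- and loop-group found)
--     groups = [group for group in groups if group != set()]
--     return groups if len(groups) > 1 else []
-- ===== SOURCE B (Python) =====
-- def _loop_cut(dfg, start, end):
--     # The two reachability/completeness passes in the original never change the
--     # groups (the helper rebinds a local, and the merge condition is self-contradictory),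
--     # so the cut is just: do-group = start/end activities, loop-group = activities of
--     # edges entirely outside it; return them only if both are non-empty.
--     do_group = set(start) | set(end)
--     loop_group = {v for (p, q) in dfg for v in (p, q)
--                   if p not in do_group and q not in do_group}
--     return [do_group, loop_group] if do_group and loop_group else []
-- ===== Notes on version B (the rewrite author's own statement) =====
-- stated objective: simpler
-- what changed: A's exclude_non_reachable passes only rebind a local variable and its two completeness while-loops have a self-contradictory merge condition, so none of them ever changes the groups; B drops all of them and builds the do-group and loop-group directly in one pass over the edges.
import Mathlib
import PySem

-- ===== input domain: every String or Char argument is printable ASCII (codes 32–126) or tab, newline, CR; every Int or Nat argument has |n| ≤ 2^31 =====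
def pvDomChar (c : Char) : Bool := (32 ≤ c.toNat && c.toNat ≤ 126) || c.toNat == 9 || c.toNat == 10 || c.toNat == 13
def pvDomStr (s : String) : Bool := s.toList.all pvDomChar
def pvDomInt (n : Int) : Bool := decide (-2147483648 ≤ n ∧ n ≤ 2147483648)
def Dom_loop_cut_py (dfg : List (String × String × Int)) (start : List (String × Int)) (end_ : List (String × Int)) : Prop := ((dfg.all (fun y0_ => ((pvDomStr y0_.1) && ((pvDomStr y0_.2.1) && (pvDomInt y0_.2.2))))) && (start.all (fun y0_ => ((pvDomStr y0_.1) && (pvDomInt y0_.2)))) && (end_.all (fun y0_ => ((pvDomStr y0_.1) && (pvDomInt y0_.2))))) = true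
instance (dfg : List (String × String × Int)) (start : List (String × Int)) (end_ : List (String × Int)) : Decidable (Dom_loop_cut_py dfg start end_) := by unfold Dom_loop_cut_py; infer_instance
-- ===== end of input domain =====

-- B simplifies A: A's two `exclude_non_reachable` passes only rebind a local name and its two
-- completeness while-loops have a self-contradictory merge condition, so (provably) none of them
-- ever changes the groups; B computes the two groups directly (objective: simpler, and faster
-- since the dead rescanning passes are gone).

-- ===== PORT A =====
-- `exclude_non_reachable`: rebinds its local `groups`, so A's calls discard this value.
def pvExclNonReach (a b : String) (groups : List (PySem.Set String)) : List (PySem.Set String) :=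
  let group_a := groups.foldl (fun ga g => if PySem.Set.contains g a then g else ga) PySem.Set.empty
  let group_b := groups.foldl (fun gb g => if PySem.Set.contains g b then g else gb) PySem.Set.empty
  let groups := groups.filter (fun g => !(PySem.Set.equal g group_a) && !(PySem.Set.equal g group_b))
  PySem.Set.union group_a group_b :: groups

-- body of the first while-loop's `merge` computation (start completeness)
def pvMerge1 (edges : List (String × String)) (startActs : PySem.Set String) (g : PySem.Set String) : Bool :=
  g.foldl (fun merge a =>
    edges.foldl (fun merge xb =>
      if xb.1 == a && PySem.Set.contains startActs xb.2 then
        if !(startActs.any (fun s => edges.contains (a, s))) then true else merge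
      else merge) merge) false

-- body of the second while-loop's `merge` computation (end completeness)
def pvMerge2 (edges : List (String × String)) (endActs : PySem.Set String) (g : PySem.Set String) : Bool :=
  g.foldl (fun merge a =>
    edges.foldl (fun merge bx =>
      if bx.2 == a && PySem.Set.contains endActs bx.1 then
        if !(endActs.any (fun e => edges.contains (e, a))) then true else merge
      else merge) merge) false

def pvWhile1 (edges : List (String × String)) (startActs : PySem.Set String)
    (groups : List (PySem.Set String)) (i : Nat) : List (PySem.Set String) :=
  if h : i < groups.length then
    if pvMerge1 edges startActs groups[i] then
      pvWhile1 edges startActs ((groups.set 0 (PySem.Set.union (groups.headD PySem.Set.empty) groups[i])).eraseIdx i) i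
    else
      pvWhile1 edges startActs groups (i + 1)
  else groups
termination_by groups.length - i
decreasing_by
  · simp [List.length_eraseIdx, List.length_set, h]; omega
  · omega

def pvWhile2 (edges : List (String × String)) (endActs : PySem.Set String)
    (groups : List (PySem.Set String)) (i : Nat) : List (PySem.Set String) :=
  if h : i < groups.length then
    if pvMerge2 edges endActs groups[i] then
      pvWhile2 edges endActs ((groups.set 0 (PySem.Set.union (groups.headD PySem.Set.empty) groups[i])).eraseIdx i) i
    else
      pvWhile2 edges endActs groups (i + 1)
  else groups
termination_by groups.length - i
decreasing_by
  · simp [List.length_eraseIdx, List.length_set, h]; omega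
  · omega

def loop_cut_py (dfg : List (String × String × Int)) (start : List (String × Int)) (end_ : List (String × Int)) : List (List String) :=
  let edges := PySem.Dict.keys (PySem.Dict.ofList (dfg.map (fun t => ((t.1, t.2.1), t.2.2))))
  let start_activities := PySem.Set.ofList (PySem.Dict.keys (PySem.Dict.ofList start))
  let end_activities := PySem.Set.ofList (PySem.Dict.keys (PySem.Dict.ofList end_))
  let groups : List (PySem.Set String) := [PySem.Set.union start_activities end_activities]
  let inner_edges := edges.filter (fun e => !(PySem.Set.contains (groups.headD PySem.Set.empty) e.1) && !(PySem.Set.contains (groups.headD PySem.Set.empty) e.2))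
  let groups := groups ++ [PySem.Set.ofList (inner_edges.flatMap (fun e => [e.1, e.2]))]
  let pure_start_activities := PySem.Set.diff start_activities end_activities
  let groups := pure_start_activities.foldl (fun gs a =>
    edges.foldl (fun gs xb => if xb.1 == a then (let _ := pvExclNonReach a xb.2 gs; gs) else gs) gs) groups
  let pure_end_activities := PySem.Set.diff end_activities start_activities
  let groups := pure_end_activities.foldl (fun gs b =>
    edges.foldl (fun gs ax => if ax.2 == b then (let _ := pvExclNonReach ax.1 b gs; gs) else gs) gs) groups
  let groups := pvWhile1 edges start_activities groups 1
  let groups := pvWhile2 edges end_activities groups 1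
  let groups := groups.filter (fun g => !(PySem.Set.equal g PySem.Set.empty))
  if groups.length > 1 then groups else []

-- ===== PORT B =====
def loop_cut_py_alt (dfg : List (String × String × Int)) (start : List (String × Int)) (end_ : List (String × Int)) : List (List String) :=
  let do_group := PySem.Set.union (PySem.Set.ofList (PySem.Dict.keys (PySem.Dict.ofList start)))
                                  (PySem.Set.ofList (PySem.Dict.keys (PySem.Dict.ofList end_)))
  let loop_group := PySem.Set.ofList
    ((PySem.Dict.keys (PySem.Dict.ofList (dfg.map (fun t => ((t.1, t.2.1), t.2.2))))).flatMap
      (fun e => if !(PySem.Set.contains do_group e.1) && !(PySem.Set.contains do_group e.2) then [e.1, e.2] else []))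
  if !do_group.isEmpty && !loop_group.isEmpty then [do_group, loop_group] else []

-- ===== PRECONDITION & SPEC =====
def Spec_loop_cut_py (dfg : List (String × String × Int)) (start : List (String × Int)) (end_ : List (String × Int)) (out : List (List String)) : Prop := out = loop_cut_py_alt dfg start end_
instance (dfg : List (String × String × Int)) (start : List (String × Int)) (end_ : List (String × Int)) (out : List (List String)) : Decidable (Spec_loop_cut_py dfg start end_ out) := by unfold Spec_loop_cut_py; infer_instance

-- ===== CLAIM (what is proved, stated in full; the proofs are below) =====
def Claim_equal_loop_cut_py : Prop := ∀ (dfg : List (String × String × Int)) (start : List (String × Int)) (end_ : List (String × Int)), Dom_loop_cut_py dfg start end_ → Spec_loop_cut_py dfg start end_ (loop_cut_py dfg start end_)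

-- ===== LEMMAS AND PROOFS =====

-- the merge flag of the first while-loop is always False: an edge (a, b) with b a start
-- activity is itself a direct edge from a to a start activity
theorem pvMerge1_false (edges : List (String × String)) (sa g : PySem.Set String) :
    pvMerge1 edges sa g = false := by
  unfold pvMerge1
  have hinner : ∀ (a : String) (m : Bool),
      edges.foldl (fun merge xb =>
        if xb.1 == a && PySem.Set.contains sa xb.2 then
          if !(sa.any (fun s => edges.contains (a, s))) then true else merge
        else merge) m = m := by
    intro a m
    rw [PySem.List.foldl_congr_mem edges _ (fun m _ => m)]
    · exact List.foldl_fixed _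
    · intro acc xb hxb
      by_cases h1 : (xb.1 == a && PySem.Set.contains sa xb.2) = true
      · have hx : xb.1 = a := by
          have := (Bool.and_eq_true _ _).mp h1
          exact beq_iff_eq.mp this.1
        have hmem : xb.2 ∈ sa := by
          have := (Bool.and_eq_true _ _).mp h1
          simpa [PySem.Set.contains_iff] using this.2
        have hany : sa.any (fun s => edges.contains (a, s)) = true := by
          refine List.any_eq_true.mpr ⟨xb.2, hmem, ?_⟩
          have : (a, xb.2) ∈ edges := by
            rw [← hx]; simpa using hxb
          simpa [List.contains_iff_mem] using this
        rw [if_pos h1, hany]; rfl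
      · rw [if_neg h1]
  rw [PySem.List.foldl_congr_mem g _ (fun m _ => m)]
  · exact List.foldl_fixed _
  · intro acc a _; exact hinner a acc
-- the merge flag of the second while-loop is always False, symmetrically
theorem pvMerge2_false (edges : List (String × String)) (ea g : PySem.Set String) :
    pvMerge2 edges ea g = false := by
  unfold pvMerge2
  have hinner : ∀ (a : String) (m : Bool),
      edges.foldl (fun merge bx =>
        if bx.2 == a && PySem.Set.contains ea bx.1 then
          if !(ea.any (fun e => edges.contains (e, a))) then true else merge
        else merge) m = m := by
    intro a m
    rw [PySem.List.foldl_congr_mem edges _ (fun m _ => m)]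
    · exact List.foldl_fixed _
    · intro acc bx hbx
      by_cases h1 : (bx.2 == a && PySem.Set.contains ea bx.1) = true
      · have hx : bx.2 = a := by
          have := (Bool.and_eq_true _ _).mp h1
          exact beq_iff_eq.mp this.1
        have hmem : bx.1 ∈ ea := by
          have := (Bool.and_eq_true _ _).mp h1
          simpa [PySem.Set.contains_iff] using this.2
        have hany : ea.any (fun e => edges.contains (e, a)) = true := by
          refine List.any_eq_true.mpr ⟨bx.1, hmem, ?_⟩
          have : (bx.1, a) ∈ edges := by
            rw [← hx]; simpa using hbx
          simpa [List.contains_iff_mem] using this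
        rw [if_pos h1, hany]; rfl
      · rw [if_neg h1]
  rw [PySem.List.foldl_congr_mem g _ (fun m _ => m)]
  · exact List.foldl_fixed _
  · intro acc a _; exact hinner a acc

theorem pvWhile1_id (edges : List (String × String)) (sa : PySem.Set String)
    (groups : List (PySem.Set String)) (i : Nat) :
    pvWhile1 edges sa groups i = groups := by
  by_cases h : i < groups.length
  · rw [pvWhile1, dif_pos h, pvMerge1_false]
    simpa using pvWhile1_id edges sa groups (i + 1)
  · rw [pvWhile1, dif_neg h]
termination_by groups.length - i
decreasing_by omega

theorem pvWhile2_id (edges : List (String × String)) (ea : PySem.Set String)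
    (groups : List (PySem.Set String)) (i : Nat) :
    pvWhile2 edges ea groups i = groups := by
  by_cases h : i < groups.length
  · rw [pvWhile2, dif_pos h, pvMerge2_false]
    simpa using pvWhile2_id edges ea groups (i + 1)
  · rw [pvWhile2, dif_neg h]
termination_by groups.length - i
decreasing_by omega

-- building the loop-group from filtered edges vs. an if-comprehension over all edges
theorem pv_filter_flatMap {α β : Type} (l : List α) (c : α → Bool) (f : α → List β) :
    (l.filter c).flatMap f = l.flatMap (fun e => if c e then f e else []) := by
  induction l with
  | nil => rfl
  | cons x xs ih =>
    by_cases h : c x = true <;> simp [List.flatMap_cons, h, ih]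

-- a PySem.Set equals the empty set iff the underlying element list is empty
theorem pv_equal_empty (g : PySem.Set String) :
    PySem.Set.equal g PySem.Set.empty = g.isEmpty := by
  cases g with
  | nil => rfl
  | cons x xs =>
    have h : PySem.Set.equal (x :: xs) PySem.Set.empty = false := by
      by_contra h
      have h2 : PySem.Set.equal (x :: xs) (PySem.Set.empty : PySem.Set String) = true := by
        revert h; cases PySem.Set.equal (x :: xs) (PySem.Set.empty : PySem.Set String) <;> simp
      have := (PySem.Set.equal_iff _ _).mp h2 x
      simp [PySem.Set.empty] at this
    simpa [PySem.Set.empty] using h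

-- ===== VERDICT (by name: the statement is the Claim_ definition above) =====
theorem loop_cut_py_spec : Claim_equal_loop_cut_py := by
  intro dfg start end_ _
  unfold Spec_loop_cut_py loop_cut_py loop_cut_py_alt
  simp only [pvWhile1_id, pvWhile2_id, List.foldl_fixed, ite_self, List.headD_cons]
  rw [← pv_filter_flatMap]
  set g0 := PySem.Set.union (PySem.Set.ofList (PySem.Dict.keys (PySem.Dict.ofList start)))
      (PySem.Set.ofList (PySem.Dict.keys (PySem.Dict.ofList end_))) with hg0def
  set g1 := PySem.Set.ofList
    (((PySem.Dict.keys (PySem.Dict.ofList (dfg.map (fun t => ((t.1, t.2.1), t.2.2))))).filter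
      (fun e => !(PySem.Set.contains g0 e.1) && !(PySem.Set.contains g0 e.2))).flatMap
      (fun e => [e.1, e.2])) with hg1def
  have hpred : (fun g : PySem.Set String => !(PySem.Set.equal g PySem.Set.empty))
      = (fun g : PySem.Set String => !g.isEmpty) := by
    funext g; rw [pv_equal_empty]
  rw [hpred]
  cases hg0 : g0.isEmpty <;> cases hg1 : g1.isEmpty <;>
    simp [hg0, hg1]
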